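-- pv_equiv track=rewrite | github.com/theandsea/Algorithm | Hackerrank Interview Preparation Kits--3 months/w13_Minimum Loss 1.py | minimumLoss
-- ===== SOURCE A (Python) =====
-- def minimumLoss(price):
--     # Write your code here
--     yr=list(range(len(price)))
--     zipped=list(zip(price,yr))
--     zipped=sorted(zipped,key=lambda x: x[0])
--     minx=zipped[-1][0]-zipped[0][0]
--     for i in range(len(zipped)-1):
--         if zipped[i][1] > zipped[i+1][1]:
--             minx =min(minx,zipped[i+1][0]-zipped[i][0])
--     return minx
-- ===== SOURCE B (Python) =====
-- def _bisect_right(a, x):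
--     lo = 0
--     hi = len(a)
--     while lo < hi:
--         mid = (lo + hi) // 2
--         if x < a[mid]:
--             hi = mid
--         else:
--             lo = mid + 1
--     return lo
--
-- def minimumLoss(price):
--     best = max(price) - min(price)
--     seen = []
--     for p in price:
--         j = _bisect_right(seen, p)
--         if j < len(seen):
--             best = min(best, seen[j] - p)
--         seen.insert(j, p)
--     return best
-- ===== Notes on version B (the rewrite author's own statement) =====
-- stated objective: alternative
-- what changed: B drops A's sort-the-(price,year)-pairs-and-scan-adjacent-inversions approach and instead makes one chronological pass over the years, keeping the earlier prices in an incrementally maintained sorted list and minimizing against the binary-searched strict successor of each price, starting from the max-min baseline.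
import Mathlib
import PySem

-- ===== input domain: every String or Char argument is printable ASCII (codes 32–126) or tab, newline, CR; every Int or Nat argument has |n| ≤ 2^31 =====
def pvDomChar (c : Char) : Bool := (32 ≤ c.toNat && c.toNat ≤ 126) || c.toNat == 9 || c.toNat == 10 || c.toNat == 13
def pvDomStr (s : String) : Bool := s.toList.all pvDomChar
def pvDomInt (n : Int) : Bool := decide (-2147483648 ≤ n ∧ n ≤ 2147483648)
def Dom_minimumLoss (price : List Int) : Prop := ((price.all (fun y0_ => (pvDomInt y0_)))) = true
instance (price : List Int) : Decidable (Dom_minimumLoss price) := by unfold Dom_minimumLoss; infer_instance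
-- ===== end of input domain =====

-- B replaces A's sort-then-adjacent-scan by a single chronological pass over the years that
-- minimizes each price against the strictly greater earlier prices (objective: alternative).

-- ===== PORT A =====
def minimumLoss (price : List Int) : Int :=
  let yr := PySem.List.pyRange 0 (price.length : Int) 1
  let zipped := price.zip yr
  let zipped2 := PySem.List.sorted zipped (fun x => x.1) false
  let minx := (PySem.List.pyGetD zipped2 (-1) (0, 0)).1 - (PySem.List.pyGetD zipped2 0 (0, 0)).1
  (PySem.List.pyRange 0 ((zipped2.length : Int) - 1) 1).foldl
    (fun minx i =>
      if (PySem.List.pyGetD zipped2 i (0, 0)).2 > (PySem.List.pyGetD zipped2 (i + 1) (0, 0)).2 then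
        min minx ((PySem.List.pyGetD zipped2 (i + 1) (0, 0)).1 - (PySem.List.pyGetD zipped2 i (0, 0)).1)
      else minx) minx

-- ===== PORT B =====
def bisectRightLoop (a : List Int) (x : Int) (lo hi : Int) : Int :=
  if h : lo < hi then
    if x < PySem.List.pyGetD a (PySem.Int.floordiv (lo + hi) 2) 0 then
      bisectRightLoop a x lo (PySem.Int.floordiv (lo + hi) 2)
    else
      bisectRightLoop a x (PySem.Int.floordiv (lo + hi) 2 + 1) hi
  else lo
termination_by (hi - lo).toNat
decreasing_by
  · have h1 := (PySem.Int.floordiv_two_mid_bounds (le_of_lt h)).1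
    have h2 : PySem.Int.floordiv (lo + hi) 2 < hi :=
      (PySem.Int.floordiv_lt_iff_lt_mul (by omega)).mpr (by omega)
    omega
  · have h1 := (PySem.Int.floordiv_two_mid_bounds (le_of_lt h)).1
    have h2 : PySem.Int.floordiv (lo + hi) 2 < hi :=
      (PySem.Int.floordiv_lt_iff_lt_mul (by omega)).mpr (by omega)
    omega

def pyBisectRight (a : List Int) (x : Int) : Int := bisectRightLoop a x 0 (a.length : Int)

def minLossStep (st : Int × List Int) (p : Int) : Int × List Int :=
  (if pyBisectRight st.2 p < (st.2.length : Int) then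
     min st.1 (PySem.List.pyGetD st.2 (pyBisectRight st.2 p) 0 - p)
   else st.1,
   PySem.List.insert st.2 (pyBisectRight st.2 p) p)

def minimumLoss_alt (price : List Int) : Int :=
  let best := (PySem.List.max? price (fun x => x)).getD 0 - (PySem.List.min? price (fun x => x)).getD 0
  (price.foldl minLossStep (best, [])).1

-- ===== PRECONDITION & SPEC =====
-- Pre_ excludes only the empty list, on which A raises IndexError (and B raises ValueError).
def Pre_minimumLoss (price : List Int) : Prop := price ≠ []
instance (price : List Int) : Decidable (Pre_minimumLoss price) := by unfold Pre_minimumLoss; infer_instance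

def pvWitness_minimumLoss : List Int := [5, 3, 8, 2]

def Spec_minimumLoss (price : List Int) (out : Int) : Prop := out = minimumLoss_alt price
instance (price : List Int) (out : Int) : Decidable (Spec_minimumLoss price out) := by unfold Spec_minimumLoss; infer_instance

-- ===== CLAIM (what is proved, stated in full; the proofs are below) =====
def Claim_equal_minimumLoss : Prop := ∀ (price : List Int), Dom_minimumLoss price → Pre_minimumLoss price → Spec_minimumLoss price (minimumLoss price)

-- ===== LEMMAS AND PROOFS =====

-- the strict lexicographic order the stably-sorted zipped list satisfies
def lexLT (a b : Int × Int) : Prop := a.1 < b.1 ∨ (a.1 = b.1 ∧ a.2 < b.2)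

-- "v is a loss of some inverted pair of xs" (earlier strictly greater price)
def CandIn (xs : List Int) (v : Int) : Prop :=
  ∃ i j : Nat, i < j ∧ j < xs.length ∧ xs.getD i 0 > xs.getD j 0 ∧ v = xs.getD i 0 - xs.getD j 0

-- proof-side names for the two ports' bodies
def Lsort (price : List Int) : List (Int × Int) :=
  PySem.List.sorted (price.zip (PySem.List.pyRange 0 (price.length : Int) 1)) (fun x => x.1) false

def baseOf (price : List Int) : Int :=
  (PySem.List.max? price (fun x => x)).getD 0 - (PySem.List.min? price (fun x => x)).getD 0

lemma minimumLoss_eq (price : List Int) :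
    minimumLoss price =
      (PySem.List.pyRange 0 (((Lsort price).length : Int) - 1) 1).foldl
        (fun minx i =>
          if (PySem.List.pyGetD (Lsort price) i (0, 0)).2 > (PySem.List.pyGetD (Lsort price) (i + 1) (0, 0)).2 then
            min minx ((PySem.List.pyGetD (Lsort price) (i + 1) (0, 0)).1 - (PySem.List.pyGetD (Lsort price) i (0, 0)).1)
          else minx)
        ((PySem.List.pyGetD (Lsort price) (-1) (0, 0)).1 - (PySem.List.pyGetD (Lsort price) 0 (0, 0)).1) := rfl

lemma minimumLoss_alt_eq (price : List Int) :
    minimumLoss_alt price = (price.foldl minLossStep (baseOf price, [])).1 := rfl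

-- generic characterisation of a conditional running minimum
lemma foldl_min_if {α : Type} (l : List α) (P : α → Prop) [DecidablePred P] (f : α → Int) (m0 : Int) :
    (l.foldl (fun m x => if P x then min m (f x) else m) m0) ≤ m0 ∧
    (∀ x ∈ l, P x → (l.foldl (fun m x => if P x then min m (f x) else m) m0) ≤ f x) ∧
    ((l.foldl (fun m x => if P x then min m (f x) else m) m0) = m0 ∨
      ∃ x ∈ l, P x ∧ (l.foldl (fun m x => if P x then min m (f x) else m) m0) = f x) := by
  induction l generalizing m0 with
  | nil => simp
  | cons y t ih =>
    simp only [List.foldl_cons]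
    by_cases hy : P y
    · simp only [if_pos hy]
      obtain ⟨h1, h2, h3⟩ := ih (min m0 (f y))
      refine ⟨le_trans h1 (min_le_left _ _), ?_, ?_⟩
      · intro x hx hPx
        rcases List.mem_cons.mp hx with hx | hx
        · exact le_trans h1 (by rw [hx]; exact min_le_right _ _)
        · exact h2 x hx hPx
      · rcases h3 with h3 | ⟨x, hx, hPx, hfx⟩
        · rcases le_or_gt m0 (f y) with hc | hc
          · left; rw [h3]; exact min_eq_left hc
          · right; exact ⟨y, List.mem_cons_self, hy, by rw [h3]; exact min_eq_right hc.le⟩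
        · right; exact ⟨x, List.mem_cons_of_mem _ hx, hPx, hfx⟩
    · simp only [if_neg hy]
      obtain ⟨h1, h2, h3⟩ := ih m0
      refine ⟨h1, ?_, ?_⟩
      · intro x hx hPx
        rcases List.mem_cons.mp hx with hx | hx
        · exact absurd (hx ▸ hPx) hy
        · exact h2 x hx hPx
      · rcases h3 with h3 | ⟨x, hx, hPx, hfx⟩
        · exact Or.inl h3
        · exact Or.inr ⟨x, List.mem_cons_of_mem _ hx, hPx, hfx⟩

-- stability: inserting an element whose snd exceeds all snds keeps Pairwise lexLT
lemma insertBy_lex (x : Int × Int) (acc : List (Int × Int))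
    (hacc : acc.Pairwise lexLT) (hall : ∀ y ∈ acc, y.2 < x.2) :
    (PySem.List.insertBy (fun a b => decide (a.1 < b.1)) x acc).Pairwise lexLT := by
  induction acc with
  | nil => simp [PySem.List.insertBy]
  | cons y t ih =>
    rw [PySem.List.insertBy]
    by_cases hxy : x.1 < y.1
    · simp only [decide_eq_true_eq, if_pos hxy]
      refine List.Pairwise.cons ?_ hacc
      intro z hz
      rcases List.mem_cons.mp hz with hz | hz
      · exact Or.inl (hz ▸ hxy)
      · have := List.rel_of_pairwise_cons hacc hz
        rcases this with h | ⟨h, _⟩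
        · exact Or.inl (lt_trans hxy h)
        · exact Or.inl (h ▸ hxy)
    · simp only [decide_eq_true_eq, if_neg hxy]
      refine List.Pairwise.cons ?_ (ih (List.Pairwise.sublist (List.sublist_cons_self y t) hacc)
        (fun z hz => hall z (List.mem_cons_of_mem _ hz)))
      intro z hz
      rw [PySem.List.mem_insertBy] at hz
      rcases hz with hz | hz
      · subst hz
        rcases lt_or_eq_of_le (not_lt.mp hxy) with h | h
        · exact Or.inl h
        · exact Or.inr ⟨h, hall y List.mem_cons_self⟩
      · exact List.rel_of_pairwise_cons hacc hz

lemma sorted_lex (xs : List (Int × Int)) (h : xs.Pairwise (fun a b => a.2 < b.2)) :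
    (PySem.List.sorted xs (fun x => x.1) false).Pairwise lexLT := by
  rw [PySem.List.sorted_eq_foldl_insertBy]
  suffices haux : ∀ (ys : List (Int × Int)) (acc : List (Int × Int)),
      acc.Pairwise lexLT → (∀ a ∈ acc, ∀ b ∈ ys, a.2 < b.2) → ys.Pairwise (fun a b => a.2 < b.2) →
      (ys.foldl (fun acc x => PySem.List.insertBy (fun a b => decide (a.1 < b.1)) x acc) acc).Pairwise lexLT by
    exact haux xs [] (by simp) (by simp) h
  intro ys
  induction ys with
  | nil => intro acc h1 _ _; simpa using h1
  | cons y t ih =>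
    intro acc h1 h2 h3
    simp only [List.foldl_cons]
    refine ih _ (insertBy_lex y acc h1 (fun a ha => h2 a ha y List.mem_cons_self)) ?_
      (List.Pairwise.sublist (List.sublist_cons_self y t) h3)
    intro a ha b hb
    rw [PySem.List.mem_insertBy] at ha
    rcases ha with ha | ha
    · exact ha ▸ List.rel_of_pairwise_cons h3 hb
    · exact h2 a ha b (List.mem_cons_of_mem _ hb)

-- CandIn is stable under extending the list on the right
lemma candIn_append (pre ys : List Int) (v : Int) (h : CandIn pre v) : CandIn (pre ++ ys) v := by
  obtain ⟨i, j, hij, hj, hgt, hv⟩ := h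
  have hi : i < pre.length := lt_trans hij hj
  refine ⟨i, j, hij, by simp; omega, ?_, ?_⟩ <;>
    rw [List.getD_eq_getElem _ _ (by simp; omega), List.getD_eq_getElem _ _ (by simp; omega),
        List.getElem_append_left hi, List.getElem_append_left hj] <;>
    rw [List.getD_eq_getElem _ _ hi, List.getD_eq_getElem _ _ hj] at hgt hv <;> assumption

-- a sorted list is monotone in getD
lemma getD_mono (a : List Int) (hs : a.Pairwise (· ≤ ·)) (i j : Nat) (hij : i ≤ j) (hj : j < a.length) :
    a.getD i 0 ≤ a.getD j 0 := by
  rw [List.getD_eq_getElem _ _ (by omega), List.getD_eq_getElem _ _ hj]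
  rcases Nat.lt_or_ge i j with h | h
  · exact List.pairwise_iff_getElem.mp hs i j (by omega) hj h
  · have hij' : i = j := by omega
    subst hij'; exact le_refl _

-- B's hand-written binary search finds the frontier between ≤ x and > x on a sorted list
lemma bisectRightLoop_spec (a : List Int) (x : Int) (hs : a.Pairwise (· ≤ ·)) :
    ∀ (n : Nat) (lo hi : Int) (_hn : (hi - lo).toNat = n) (_h0 : 0 ≤ lo) (_h1 : lo ≤ hi)
      (_h2 : hi ≤ (a.length : Int)),
      lo ≤ bisectRightLoop a x lo hi ∧ bisectRightLoop a x lo hi ≤ hi ∧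
      (∀ i : Nat, lo ≤ (i : Int) → (i : Int) < bisectRightLoop a x lo hi → a.getD i 0 ≤ x) ∧
      (∀ i : Nat, bisectRightLoop a x lo hi ≤ (i : Int) → (i : Int) < hi → a.getD i 0 > x) := by
  intro n
  induction n using Nat.strong_induction_on with
  | _ n ih =>
    intro lo hi hn h0 h1 h2
    rw [bisectRightLoop]
    by_cases hlt : lo < hi
    · simp only [dif_pos hlt]
      have hmid1 := (PySem.Int.floordiv_two_mid_bounds (le_of_lt hlt)).1
      have hmid2 : PySem.Int.floordiv (lo + hi) 2 < hi :=
        (PySem.Int.floordiv_lt_iff_lt_mul (by omega)).mpr (by omega)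
      set mid := PySem.Int.floordiv (lo + hi) 2 with hmiddef
      have hmval : PySem.List.pyGetD a mid 0 = a.getD mid.toNat 0 := by
        rw [PySem.List.pyGetD_eq_getElem a 0 (by omega) (by omega), List.getD_eq_getElem _ _ (by omega)]
      by_cases hcmp : x < PySem.List.pyGetD a mid 0
      · simp only [if_pos hcmp]
        obtain ⟨r1, r2, r3, r4⟩ := ih (mid - lo).toNat (by omega) lo mid rfl h0 (by omega) (by omega)
        refine ⟨r1, by omega, r3, ?_⟩
        intro i hi1 hi2
        rcases (by omega : (i : Int) < mid ∨ mid ≤ (i : Int)) with hc | hc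
        · exact r4 i hi1 hc
        · have hm := getD_mono a hs mid.toNat i (by omega) (by omega)
          rw [hmval] at hcmp
          omega
      · simp only [if_neg hcmp]
        obtain ⟨r1, r2, r3, r4⟩ := ih (hi - (mid + 1)).toNat (by omega) (mid + 1) hi rfl (by omega) (by omega) h2
        refine ⟨by omega, r2, ?_, r4⟩
        intro i hi1 hi2
        rcases (by omega : mid + 1 ≤ (i : Int) ∨ (i : Int) < mid + 1) with hc | hc
        · exact r3 i hc hi2
        · have hm := getD_mono a hs i mid.toNat (by omega) (by omega)
          rw [hmval] at hcmp
          omega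
    · simp only [dif_neg hlt]
      exact ⟨le_refl lo, by omega, fun i hi1 hi2 => by omega, fun i hi1 hi2 => by omega⟩

lemma pyBisectRight_spec (a : List Int) (x : Int) (hs : a.Pairwise (· ≤ ·)) :
    0 ≤ pyBisectRight a x ∧ pyBisectRight a x ≤ (a.length : Int) ∧
    (∀ i : Nat, (i : Int) < pyBisectRight a x → a.getD i 0 ≤ x) ∧
    (∀ i : Nat, pyBisectRight a x ≤ (i : Int) → i < a.length → a.getD i 0 > x) := by
  obtain ⟨r1, r2, r3, r4⟩ := bisectRightLoop_spec a x hs ((a.length : Int) - 0).toNat 0 (a.length : Int)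
    rfl (le_refl 0) (by omega) (le_refl _)
  exact ⟨r1, r2, fun i h => r3 i (by omega) h, fun i h1 h2 => r4 i h1 (by omega)⟩

-- inserting p at the frontier keeps the list sorted
lemma sorted_insert_at (seen : List Int) (p : Int) (t : Nat) (ht : t ≤ seen.length)
    (hs : seen.Pairwise (· ≤ ·))
    (hleft : ∀ i : Nat, i < t → seen.getD i 0 ≤ p)
    (hright : ∀ i : Nat, t ≤ i → i < seen.length → seen.getD i 0 > p) :
    (seen.take t ++ p :: seen.drop t).Pairwise (· ≤ ·) := by
  rw [List.pairwise_append]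
  refine ⟨List.Pairwise.sublist (List.take_sublist t seen) hs, ?_, ?_⟩
  · rw [List.pairwise_cons]
    refine ⟨?_, List.Pairwise.sublist (List.drop_sublist t seen) hs⟩
    intro y hy
    obtain ⟨i, hi, hyi⟩ := List.mem_iff_getElem.mp hy
    rw [List.getElem_drop] at hyi
    have := hright (t + i) (by omega) (by simp at hi; omega)
    rw [List.getD_eq_getElem _ _ (by simp at hi; omega)] at this
    omega
  · intro q hq y hy
    obtain ⟨i, hi, hqi⟩ := List.mem_iff_getElem.mp hq
    have hit : i < t := by simp at hi; omega
    have hilen : i < seen.length := by simp at hi; omega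
    rw [List.getElem_take] at hqi
    have hqp : q ≤ p := by
      have := hleft i hit
      rw [List.getD_eq_getElem _ _ hilen] at this
      omega
    rcases List.mem_cons.mp hy with hy | hy
    · omega
    · obtain ⟨i', hi', hyi'⟩ := List.mem_iff_getElem.mp hy
      rw [List.getElem_drop] at hyi'
      have := hright (t + i') (by omega) (by simp at hi'; omega)
      rw [List.getD_eq_getElem _ _ (by simp at hi'; omega)] at this
      omega

-- B's loop invariant
lemma bloop (rest : List Int) : ∀ (pre seen : List Int) (b base : Int),
    seen.Perm pre → seen.Pairwise (· ≤ ·) →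
    b ≤ base → (∀ v, CandIn pre v → b ≤ v) → (b = base ∨ CandIn pre b) →
    ((rest.foldl minLossStep (b, seen)).1 ≤ base ∧
     (∀ v, CandIn (pre ++ rest) v → (rest.foldl minLossStep (b, seen)).1 ≤ v) ∧
     ((rest.foldl minLossStep (b, seen)).1 = base ∨
       CandIn (pre ++ rest) (rest.foldl minLossStep (b, seen)).1)) := by
  induction rest with
  | nil =>
    intro pre seen b base hperm hsort h1 h2 h3
    simp only [List.foldl_nil, List.append_nil]
    exact ⟨h1, h2, h3⟩
  | cons p t ih =>
    intro pre seen b base hperm hsort h1 h2 h3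
    simp only [List.foldl_cons]
    obtain ⟨s0, s1, s2, s3⟩ := pyBisectRight_spec seen p hsort
    have hlenpre : seen.length = pre.length := hperm.length_eq
    have hstep : minLossStep (b, seen) p =
        (if pyBisectRight seen p < (seen.length : Int) then
           min b (PySem.List.pyGetD seen (pyBisectRight seen p) 0 - p)
         else b,
         PySem.List.insert seen (pyBisectRight seen p) p) := rfl
    rw [hstep]
    set j := pyBisectRight seen p with hjdef
    set b' := if j < (seen.length : Int) then min b (PySem.List.pyGetD seen j 0 - p) else b with hb'
    have hval : j < (seen.length : Int) → PySem.List.pyGetD seen j 0 = seen.getD j.toNat 0 := by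
      intro hjlt
      rw [PySem.List.pyGetD_eq_getElem seen 0 (by omega) (by omega), List.getD_eq_getElem _ _ (by omega)]
    have g1 : b' ≤ b := by
      rw [hb']; split
      · exact min_le_left _ _
      · exact le_refl b
    have g2 : ∀ q ∈ seen, q > p → b' ≤ q - p := by
      intro q hq hqp
      obtain ⟨i, hi, hqi⟩ := List.mem_iff_getElem.mp hq
      have hji : j ≤ (i : Int) := by
        by_contra hc
        have := s2 i (by omega)
        rw [List.getD_eq_getElem _ _ hi, hqi] at this
        omega
      have hjlt : j < (seen.length : Int) := by omega
      have hmono : seen.getD j.toNat 0 ≤ seen.getD i 0 := getD_mono seen hsort j.toNat i (by omega) hi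
      rw [List.getD_eq_getElem _ _ hi, hqi] at hmono
      rw [hb', if_pos hjlt, hval hjlt]
      have := min_le_right b (seen.getD j.toNat 0 - p)
      omega
    have g3 : b' = b ∨ ∃ q ∈ seen, q > p ∧ b' = q - p := by
      rw [hb']
      by_cases hjlt : j < (seen.length : Int)
      · rw [if_pos hjlt]
        rcases le_or_gt b (PySem.List.pyGetD seen j 0 - p) with hc | hc
        · exact Or.inl (min_eq_left hc)
        · refine Or.inr ⟨seen.getD j.toNat 0, ?_, ?_, ?_⟩
          · rw [List.getD_eq_getElem _ _ (by omega)]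
            exact List.getElem_mem _
          · exact s3 j.toNat (by omega) (by omega)
          · rw [hval hjlt]
            exact min_eq_right (by rw [hval hjlt] at hc; omega)
      · rw [if_neg hjlt]
        exact Or.inl rfl
    have hjt : j = ((j.toNat : Nat) : Int) := by omega
    have hins : PySem.List.insert seen j p = seen.take j.toNat ++ p :: seen.drop j.toNat := by
      rw [hjt]; exact PySem.List.insert_natCast seen j.toNat p (by omega)
    have hperm' : (PySem.List.insert seen j p).Perm (pre ++ [p]) := by
      rw [hins]
      have hmid : (seen.take j.toNat ++ p :: seen.drop j.toNat).Perm (p :: seen) := by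
        have := List.perm_middle (a := p) (l₁ := seen.take j.toNat) (l₂ := seen.drop j.toNat)
        rwa [List.take_append_drop] at this
      exact hmid.trans ((hperm.cons p).trans (List.perm_append_singleton p pre).symm)
    have hsort' : (PySem.List.insert seen j p).Pairwise (· ≤ ·) := by
      rw [hins]
      refine sorted_insert_at seen p j.toNat (by omega) hsort ?_ ?_
      · intro i hi2; exact s2 i (by omega)
      · intro i hi1 hi2; exact s3 i (by omega) hi2
    have h2' : ∀ v, CandIn (pre ++ [p]) v → b' ≤ v := by
      intro v hv
      obtain ⟨i, jj, hij, hj, hgt, hv⟩ := hv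
      simp only [List.length_append, List.length_cons, List.length_nil] at hj
      have hi : i < pre.length := by omega
      rcases Nat.lt_or_ge jj pre.length with hjl | hjl
      · refine le_trans g1 (h2 v ⟨i, jj, hij, hjl, ?_, ?_⟩) <;>
          rw [List.getD_eq_getElem _ _ hi, List.getD_eq_getElem _ _ hjl] <;>
          rw [List.getD_eq_getElem _ _ (by simp; omega), List.getD_eq_getElem _ _ (by simp; omega),
              List.getElem_append_left hi, List.getElem_append_left hjl] at hgt hv <;> assumption
      · have hjp : jj = pre.length := by omega
        subst hjp
        rw [List.getD_eq_getElem _ _ (by simp; omega), List.getD_eq_getElem _ _ (by simp),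
            List.getElem_append_left hi] at hgt hv
        simp only [List.getElem_append_right (Nat.le_refl pre.length)] at hgt hv
        simp only [Nat.sub_self, List.getElem_cons_zero] at hgt hv
        rw [hv]
        exact g2 pre[i] (hperm.mem_iff.mpr (List.getElem_mem hi)) hgt
    have h3' : b' = base ∨ CandIn (pre ++ [p]) b' := by
      rcases g3 with g3 | ⟨q, hq, hqp, hb'q⟩
      · rcases h3 with h3 | h3
        · exact Or.inl (g3 ▸ h3)
        · exact Or.inr (g3 ▸ candIn_append pre [p] b h3)
      · obtain ⟨i, hi, hqi⟩ := List.mem_iff_getElem.mp (hperm.mem_iff.mp hq)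
        refine Or.inr ⟨i, pre.length, hi, by simp, ?_, ?_⟩ <;>
          rw [List.getD_eq_getElem _ _ (by simp; omega), List.getD_eq_getElem _ _ (by simp),
              List.getElem_append_left hi]
        · simpa [List.getElem_append_right (Nat.le_refl pre.length), hqi] using hqp
        · simpa [List.getElem_append_right (Nat.le_refl pre.length), hqi] using hb'q
    have := ih (pre ++ [p]) (PySem.List.insert seen j p) b' base hperm' hsort'
      (le_trans g1 h1) h2' h3'
    simp only [List.append_assoc, List.singleton_append] at this
    exact this

-- an overall descent of the year component forces an adjacent descent
lemma descent (L : List (Int × Int)) : ∀ (d a b : Nat) (_hd : b - a = d) (_hab : a < b) (hb : b < L.length),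
    (L[a]'(by omega)).2 > L[b].2 →
    ∃ k, a ≤ k ∧ k + 1 ≤ b ∧ ∃ hk1 : k + 1 < L.length, (L[k]'(by omega)).2 > (L[k+1]'hk1).2 := by
  intro d
  induction d with
  | zero => intro a b hd hab _ _; omega
  | succ d ih =>
    intro a b hd hab hb hgt
    have ha1 : a + 1 < L.length := by omega
    by_cases hstep : (L[a]'(by omega)).2 > (L[a+1]'ha1).2
    · exact ⟨a, le_refl a, hab, ha1, hstep⟩
    · have hab1 : a + 1 < b := by
        rcases Nat.lt_or_ge (a+1) b with h | h
        · exact h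
        · exfalso
          apply hstep
          have hba : b = a + 1 := by omega
          subst hba
          exact hgt
      have hgt' : (L[a+1]'ha1).2 > L[b].2 := lt_of_lt_of_le hgt (not_lt.mp hstep)
      obtain ⟨k, hk1, hk2, hk3, hk4⟩ := ih (a+1) b (by omega) hab1 hb hgt'
      exact ⟨k, by omega, hk2, hk3, hk4⟩

theorem minimumLoss_spec_aux (price : List Int) (hne : price ≠ []) :
    minimumLoss price = minimumLoss_alt price := by
  have hn : 0 < price.length := List.length_pos_iff.mpr hne
  set Z := price.zip (PySem.List.pyRange 0 (price.length : Int) 1) with hZdef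
  have hZlen : Z.length = price.length := by
    simp [hZdef, PySem.List.length_pyRange_one]
  have hZget : ∀ (k : Nat) (hk : k < price.length), Z[k]'(by omega) = (price[k], (k : Int)) := by
    intro k hk
    simp [hZdef, List.getElem_zip, PySem.List.getElem_pyRange_one]
  set L := Lsort price with hLdef
  have hLZ : L = PySem.List.sorted Z (fun x => x.1) false := by rw [hLdef, hZdef]; rfl
  have hLperm : L.Perm Z := by rw [hLZ]; exact PySem.List.sorted_perm Z (fun x => x.1) false
  have hLlen : L.length = price.length := by rw [hLperm.length_eq, hZlen]
  have hZne : Z ≠ [] := by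
    intro h; rw [h] at hZlen; simp at hZlen; omega
  have hLne : L ≠ [] := by
    rw [hLZ]
    intro h
    exact hZne ((PySem.List.sorted_eq_nil_iff Z _ false).mp h)
  have hZsnd : Z.Pairwise (fun a b => a.2 < b.2) := by
    rw [List.pairwise_iff_getElem]
    intro i j hi hj hij
    rw [hZget i (by omega), hZget j (by omega)]
    simpa using hij
  have hLlex : L.Pairwise lexLT := hLZ ▸ sorted_lex Z hZsnd
  have hmem : ∀ x ∈ L, ∃ (k : Nat) (hk : k < price.length), x = (price[k], (k : Int)) := by
    intro x hx
    obtain ⟨k, hk, hxk⟩ := List.mem_iff_getElem.mp (hLperm.mem_iff.mp hx)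
    exact ⟨k, by omega, by rw [← hxk, hZget k (by omega)]⟩
  have hmemL : ∀ (k : Nat) (hk : k < price.length), (price[k], (k : Int)) ∈ L := by
    intro k hk
    exact hLperm.mem_iff.mpr (List.mem_iff_getElem.mpr ⟨k, by omega, hZget k hk⟩)
  have hfstmono : ∀ (p q : Nat) (_hpq : p ≤ q) (hq : q < L.length), (L[p]'(by omega)).1 ≤ L[q].1 := by
    intro p q hpq hq
    rcases Nat.lt_or_ge p q with h | h
    · rcases List.pairwise_iff_getElem.mp hLlex p q (by omega) hq h with h1 | ⟨h1, _⟩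
      · exact le_of_lt h1
      · exact le_of_eq h1
    · have : p = q := by omega
      subst this; exact le_refl _
  -- max and min of price
  obtain ⟨M, hMeq⟩ : ∃ M, PySem.List.max? price (fun x => x) = some M := by
    cases h : PySem.List.max? price (fun x => x) with
    | none => exact absurd ((PySem.List.max?_eq_none_iff price _).mp h) hne
    | some M => exact ⟨M, rfl⟩
  obtain ⟨m, hmeq⟩ : ∃ m, PySem.List.min? price (fun x => x) = some m := by
    cases h : PySem.List.min? price (fun x => x) with
    | none => exact absurd ((PySem.List.min?_eq_none_iff price _).mp h) hne
    | some m => exact ⟨m, rfl⟩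
  have hMmem : M ∈ price := PySem.List.max?_mem hMeq
  have hmmem : m ∈ price := PySem.List.min?_mem hmeq
  have hMmax : ∀ y ∈ price, y ≤ M := PySem.List.max?_isMax hMeq
  have hmmin : ∀ y ∈ price, m ≤ y := PySem.List.min?_isMin hmeq
  have hbase : baseOf price = M - m := by rw [baseOf, hMeq, hmeq]; rfl
  -- head and last of L
  have hfst_mem : ∀ (k : Nat) (hk : k < L.length), (L[k]'hk).1 ∈ price := by
    intro k hk
    obtain ⟨j, hj, hLj⟩ := hmem (L[k]'hk) (List.getElem_mem hk)
    rw [hLj]; exact List.getElem_mem hj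
  have hlast : (L.getLast hLne).1 = M := by
    rw [List.getLast_eq_getElem]
    refine le_antisymm (hMmax _ (hfst_mem _ (by omega))) ?_
    obtain ⟨kM, hkM, hkMv⟩ := List.mem_iff_getElem.mp hMmem
    obtain ⟨c, hc, hLc⟩ := List.mem_iff_getElem.mp (hmemL kM hkM)
    have hMc : (L[c]'hc).1 = M := by rw [hLc]; exact hkMv
    calc M = (L[c]'hc).1 := hMc.symm
      _ ≤ (L[L.length - 1]'(by omega)).1 := hfstmono c (L.length - 1) (by omega) (by omega)
  have hhead : (L[0]'(by omega)).1 = m := by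
    refine le_antisymm ?_ (hmmin _ (hfst_mem _ (by omega)))
    obtain ⟨km, hkm, hkmv⟩ := List.mem_iff_getElem.mp hmmem
    obtain ⟨c, hc, hLc⟩ := List.mem_iff_getElem.mp (hmemL km hkm)
    have hmc : (L[c]'hc).1 = m := by rw [hLc]; exact hkmv
    calc (L[0]'(by omega)).1 ≤ (L[c]'hc).1 := hfstmono 0 c (by omega) hc
      _ = m := hmc
  -- the baseline A starts from equals max - min
  have hminx0 : (PySem.List.pyGetD L (-1) (0, 0)).1 - (PySem.List.pyGetD L 0 (0, 0)).1 = M - m := by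
    rw [PySem.List.pyGetD_neg_one L (0, 0) hLne,
        PySem.List.pyGetD_eq_getElem L (0, 0) (by omega) (by omega), hlast]
    have h0 : ((0 : Int)).toNat = 0 := rfl
    rw [show (L[((0:Int)).toNat]'(by omega)) = (L[0]'(by omega)) from by simp, hhead]
  -- characterisation of A's scan
  obtain ⟨a1, a2, a3⟩ := foldl_min_if (PySem.List.pyRange 0 ((L.length : Int) - 1) 1)
      (fun i => (PySem.List.pyGetD L i (0, 0)).2 > (PySem.List.pyGetD L (i + 1) (0, 0)).2)
      (fun i => (PySem.List.pyGetD L (i + 1) (0, 0)).1 - (PySem.List.pyGetD L i (0, 0)).1)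
      ((PySem.List.pyGetD L (-1) (0, 0)).1 - (PySem.List.pyGetD L 0 (0, 0)).1)
  -- characterisation of B's pass
  obtain ⟨b1, b2, b3⟩ := bloop price [] [] (M - m) (M - m) (List.Perm.refl [])
      List.Pairwise.nil (le_refl _)
      (fun v hv => absurd hv (by rintro ⟨i, j, hij, hj, -⟩; simp at hj))
      (Or.inl rfl)
  simp only [List.nil_append] at b2 b3
  -- every adjacent inversion of L is an inverted pair of price
  have bridge1 : ∀ (k : Nat) (hk1 : k + 1 < L.length),
      (L[k]'(by omega)).2 > (L[k+1]'hk1).2 → CandIn price ((L[k+1]'hk1).1 - (L[k]'(by omega)).1) := by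
    intro k hk1 hgt
    obtain ⟨kj, hkj, hLk⟩ := hmem (L[k]'(by omega)) (List.getElem_mem _)
    obtain ⟨ki, hki, hLk1⟩ := hmem (L[k+1]'hk1) (List.getElem_mem _)
    have hij : ki < kj := by
      rw [hLk, hLk1] at hgt; simp only [] at hgt; exact_mod_cast hgt
    have hfstlt : (L[k]'(by omega)).1 < (L[k+1]'hk1).1 := by
      rcases List.pairwise_iff_getElem.mp hLlex k (k+1) (by omega) hk1 (by omega) with h | ⟨heq, h2⟩
      · exact h
      · exfalso; rw [hLk, hLk1] at h2 hgt; simp only [] at h2 hgt; omega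
    refine ⟨ki, kj, hij, hkj, ?_, ?_⟩
    · rw [List.getD_eq_getElem _ _ (by omega : ki < price.length), List.getD_eq_getElem _ _ hkj]
      rw [hLk, hLk1] at hfstlt; exact hfstlt
    · rw [List.getD_eq_getElem _ _ (by omega : ki < price.length), List.getD_eq_getElem _ _ hkj]
      rw [hLk, hLk1]
  -- every inverted pair of price dominates some adjacent inversion of L
  have hA_le_cand : ∀ v, CandIn price v →
      (PySem.List.pyRange 0 ((L.length : Int) - 1) 1).foldl
        (fun minx i =>
          if (PySem.List.pyGetD L i (0, 0)).2 > (PySem.List.pyGetD L (i + 1) (0, 0)).2 then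
            min minx ((PySem.List.pyGetD L (i + 1) (0, 0)).1 - (PySem.List.pyGetD L i (0, 0)).1)
          else minx)
        ((PySem.List.pyGetD L (-1) (0, 0)).1 - (PySem.List.pyGetD L 0 (0, 0)).1) ≤ v := by
    intro v hv
    obtain ⟨ki, kj, hij, hj, hgt, hveq⟩ := hv
    rw [List.getD_eq_getElem _ _ (by omega : ki < price.length), List.getD_eq_getElem _ _ hj] at hgt hveq
    obtain ⟨a, ha, hLa⟩ := List.mem_iff_getElem.mp (hmemL kj hj)
    obtain ⟨b, hbb, hLb⟩ := List.mem_iff_getElem.mp (hmemL ki (by omega))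
    have hane : a < b := by
      rcases Nat.lt_trichotomy a b with h | h | h
      · exact h
      · exfalso
        subst h
        have hh := hLa.symm.trans hLb
        rw [Prod.mk.injEq] at hh
        have : (kj : Int) = (ki : Int) := hh.2
        omega
      · exfalso
        rcases List.pairwise_iff_getElem.mp hLlex b a hbb ha h with hlt | ⟨heq, -⟩
        · rw [hLa, hLb] at hlt; simp only [] at hlt; omega
        · rw [hLa, hLb] at heq; simp only [] at heq; omega
    have hsnd : (L[a]'ha).2 > (L[b]'hbb).2 := by
      rw [hLa, hLb]; simp only []; exact_mod_cast hij
    obtain ⟨k, hka, hkb, hk1, hkinv⟩ := descent L (b - a) a b rfl hane hbb hsnd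
    have hx : ((k : Nat) : Int) ∈ PySem.List.pyRange 0 ((L.length : Int) - 1) 1 := by
      rw [PySem.List.mem_pyRange_one]
      constructor <;> omega
    have g1 : PySem.List.pyGetD L ((k : Int)) (0, 0) = L[k]'(by omega) := by
      rw [PySem.List.pyGetD_eq_getElem L (0, 0) (by omega) (by omega)]
      congr 1
    have g2 : PySem.List.pyGetD L ((k : Int) + 1) (0, 0) = L[k+1]'hk1 := by
      rw [PySem.List.pyGetD_eq_getElem L (0, 0) (by omega) (by omega)]
      congr 1
    have hP : (PySem.List.pyGetD L ((k : Int)) (0, 0)).2 > (PySem.List.pyGetD L ((k : Int) + 1) (0, 0)).2 := by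
      rw [g1, g2]; exact hkinv
    refine le_trans (a2 ((k : Int)) hx hP) ?_
    have hfval : (PySem.List.pyGetD L ((k : Int) + 1) (0, 0)).1 - (PySem.List.pyGetD L ((k : Int)) (0, 0)).1 =
        (L[k+1]'hk1).1 - (L[k]'(by omega)).1 := by
      rw [g1, g2]
    rw [hfval, hveq]
    have e1 : (L[k+1]'hk1).1 ≤ (L[b]'hbb).1 := hfstmono (k+1) b hkb hbb
    have e2 : (L[a]'ha).1 ≤ (L[k]'(by omega)).1 := hfstmono a k hka (by omega)
    have e3 : (L[b]'hbb).1 = price[ki] := by rw [hLb]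
    have e4 : (L[a]'ha).1 = price[kj] := by rw [hLa]
    omega
  -- assemble
  rw [minimumLoss_eq price, ← hLdef, minimumLoss_alt_eq price, hbase]
  apply le_antisymm
  · rcases b3 with hB | hB
    · rw [hB, ← hminx0]; exact a1
    · exact hA_le_cand _ hB
  · rcases a3 with hA | ⟨x, hx, hP, hval⟩
    · rw [hA, hminx0]; exact b1
    · rw [PySem.List.mem_pyRange_one] at hx
      have hk1 : x.toNat + 1 < L.length := by omega
      have g1 : PySem.List.pyGetD L x (0, 0) = L[x.toNat]'(by omega) :=
        PySem.List.pyGetD_eq_getElem L (0, 0) (by omega) (by omega)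
      have g2 : PySem.List.pyGetD L (x + 1) (0, 0) = L[x.toNat + 1]'hk1 := by
        rw [PySem.List.pyGetD_eq_getElem L (0, 0) (by omega) (by omega)]
        congr 1
        omega
      have hPk : (L[x.toNat]'(by omega)).2 > (L[x.toNat + 1]'hk1).2 := by
        rw [g1, g2] at hP
        exact hP
      have hvalk : (List.foldl (fun minx i =>
          if (PySem.List.pyGetD L i (0, 0)).2 > (PySem.List.pyGetD L (i + 1) (0, 0)).2 then
            min minx ((PySem.List.pyGetD L (i + 1) (0, 0)).1 - (PySem.List.pyGetD L i (0, 0)).1)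
          else minx)
          ((PySem.List.pyGetD L (-1) (0, 0)).1 - (PySem.List.pyGetD L 0 (0, 0)).1)
          (PySem.List.pyRange 0 ((L.length : Int) - 1) 1)) =
          (L[x.toNat + 1]'hk1).1 - (L[x.toNat]'(by omega)).1 := by
        rw [hval, g1, g2]
      rw [hvalk]
      exact b2 _ (bridge1 x.toNat hk1 hPk)

-- ===== VERDICT (by name: the statement is the Claim_ definition above) =====
theorem minimumLoss_spec : Claim_equal_minimumLoss := by
  intro price _ hpre
  exact minimumLoss_spec_aux price hpre
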